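-- pv_equiv track=rewrite | github.com/ianmtaylor1/ParkerSquare | exploration/fact2sumsquares.py | getsumsquares
-- ===== SOURCE A (Python) =====
-- import math
--
-- def getsumsquares(n, stopafter = None):
--     """Find all unique ways n can be the sum of two squares of positive
--     integers. Return a list of tuples (a,b) with 0 < a < b such that a and b
--     are square numbers and a + b = n. Note: this will not return cases when n
--     is square, a = 0 and b = n, and cases when n is twice a square and a = b.
--     If the number of expected pairs is known, that can be supplied in
--     'stopafter' for a slight improvement in time, stopping the search early.
--     """
--     if stopafter is None:
--         stopafter = n # Guaranteed to be less than n values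
--     pairs = []
--     a = 1
--     asquared = 1
--     b = math.isqrt(n - asquared)
--     bsquared = b * b
--     nfound = 0
--     while (asquared < bsquared) and (nfound < stopafter):
--         if asquared + bsquared == n:
--             pairs.append((asquared,bsquared))
--             nfound += 1
--             a += 1
--             asquared += a + a - 1
--             b -= 1
--             bsquared -= b + b + 1
--         elif asquared + bsquared > n:
--             b -= 1
--             bsquared -= b + b + 1
--         elif asquared + bsquared < n:
--             a += 1
--             asquared += a + a - 1
--     return pairs
-- ===== SOURCE B (Python) =====
-- import math
--
-- def getsumsquares(n, stopafter = None):
--     """Single-pointer rewrite: walk b down from isqrt(n-1) and test whether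
--     n - b*b is a perfect square, instead of converging two pointers."""
--     if stopafter is None:
--         stopafter = n
--     pairs = []
--     nfound = 0
--     b = math.isqrt(n - 1)
--     while nfound < stopafter:
--         bsquared = b * b
--         asquared = n - bsquared
--         if asquared >= bsquared:
--             break
--         a = math.isqrt(asquared)
--         if a * a == asquared:
--             pairs.append((asquared, bsquared))
--             nfound += 1
--         b -= 1
--     return pairs
-- ===== Notes on version B (the rewrite author's own statement) =====
-- stated objective: faster
-- what changed: Replaces A's two-pointer convergence (advancing a up and b down by comparing a^2+b^2 with n) with a single pointer b descending from isqrt(n-1) that tests whether n-b^2 is a perfect square via isqrt, so only the ~0.29*sqrt(n) values of b with n/2 < b^2 < n are visited instead of ~sqrt(n) pointer steps.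
import Mathlib
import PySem

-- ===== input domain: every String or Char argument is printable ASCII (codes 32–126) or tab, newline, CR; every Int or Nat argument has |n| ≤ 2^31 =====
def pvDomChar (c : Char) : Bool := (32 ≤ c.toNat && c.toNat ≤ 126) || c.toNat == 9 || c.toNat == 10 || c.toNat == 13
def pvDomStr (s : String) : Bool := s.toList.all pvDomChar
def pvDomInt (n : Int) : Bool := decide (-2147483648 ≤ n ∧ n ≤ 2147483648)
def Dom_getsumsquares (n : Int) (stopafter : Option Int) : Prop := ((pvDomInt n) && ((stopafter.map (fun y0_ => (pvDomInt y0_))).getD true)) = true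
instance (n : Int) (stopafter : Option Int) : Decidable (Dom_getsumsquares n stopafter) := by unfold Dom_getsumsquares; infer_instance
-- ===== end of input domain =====

-- B replaces A's two-pointer convergence with a single descending pointer b plus a
-- perfect-square test of n - b*b, intended to cut the number of loop iterations.

-- math.isqrt for nonnegative Int (only called on nonnegative arguments under Pre_)
def isqrtI (x : Int) : Int := ((Nat.sqrt x.toNat : Nat) : Int)

-- ===== PORT A =====
-- A's while loop; fuel bounds the iteration count (proved sufficient below).
def aloop (n stopafter : Int) : Nat → Int → Int → Int → Int → Int → List (Int × Int) → List (Int × Int)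
  | 0, _, _, _, _, _, pairs => pairs
  | fuel+1, a, asquared, b, bsquared, nfound, pairs =>
    if asquared < bsquared ∧ nfound < stopafter then
      if asquared + bsquared = n then
        aloop n stopafter fuel (a+1) (asquared + (a+1) + (a+1) - 1) (b-1)
          (bsquared - ((b-1) + (b-1) + 1)) (nfound+1) (pairs ++ [(asquared, bsquared)])
      else if asquared + bsquared > n then
        aloop n stopafter fuel a asquared (b-1) (bsquared - ((b-1) + (b-1) + 1)) nfound pairs
      else
        aloop n stopafter fuel (a+1) (asquared + (a+1) + (a+1) - 1) b bsquared nfound pairs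
    else pairs

def getsumsquares (n : Int) (stopafter : Option Int) : List (Int × Int) :=
  let stop := stopafter.getD n
  let b := isqrtI (n - 1)
  aloop n stop (n.toNat + 2) 1 1 b (b * b) 0 []

-- ===== PORT B =====
def bloop (n stopafter : Int) : Nat → Int → Int → List (Int × Int) → List (Int × Int)
  | 0, _, _, pairs => pairs
  | fuel+1, b, nfound, pairs =>
    if nfound < stopafter then
      let bsquared := b * b
      let asquared := n - bsquared
      if asquared ≥ bsquared then pairs
      else
        let a := isqrtI asquared
        if a * a = asquared then
          bloop n stopafter fuel (b-1) (nfound+1) (pairs ++ [(asquared, bsquared)])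
        else
          bloop n stopafter fuel (b-1) nfound pairs
    else pairs

def getsumsquares_alt (n : Int) (stopafter : Option Int) : List (Int × Int) :=
  let stop := stopafter.getD n
  bloop n stop (n.toNat + 2) (isqrtI (n - 1)) 0 []

-- ===== PRECONDITION & SPEC =====
-- Pre_ excludes n ≤ 0, on which A (and B) raise ValueError from math.isqrt(n - 1).
def Pre_getsumsquares (n : Int) (stopafter : Option Int) : Prop := 1 ≤ n
instance (n : Int) (stopafter : Option Int) : Decidable (Pre_getsumsquares n stopafter) := by unfold Pre_getsumsquares; infer_instance
def pvWitness_getsumsquares : Int × Option Int := (25, none)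

def Spec_getsumsquares (n : Int) (stopafter : Option Int) (out : List (Int × Int)) : Prop := out = getsumsquares_alt n stopafter
instance (n : Int) (stopafter : Option Int) (out : List (Int × Int)) : Decidable (Spec_getsumsquares n stopafter out) := by unfold Spec_getsumsquares; infer_instance

-- ===== CLAIM (what is proved, stated in full; the proofs are below) =====
def Claim_equal_getsumsquares : Prop := ∀ (n : Int) (stopafter : Option Int), Dom_getsumsquares n stopafter → Pre_getsumsquares n stopafter → Spec_getsumsquares n stopafter (getsumsquares n stopafter)

-- ===== LEMMAS AND PROOFS =====

lemma isqrtI_nonneg (x : Int) : 0 ≤ isqrtI x := by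
  simp [isqrtI]

lemma isqrtI_sq_le (x : Int) (hx : 0 ≤ x) : isqrtI x * isqrtI x ≤ x := by
  unfold isqrtI
  have h2 : ((Nat.sqrt x.toNat : Nat) : Int) ^ 2 ≤ ((x.toNat : Nat) : Int) := by
    exact_mod_cast Nat.sqrt_le' x.toNat
  have h3 : ((x.toNat : Nat) : Int) = x := Int.toNat_of_nonneg hx
  nlinarith [h2, h3]

lemma isqrtI_sq (a : Int) (ha : 0 ≤ a) : isqrtI (a * a) = a := by
  obtain ⟨m, rfl⟩ := Int.eq_ofNat_of_zero_le ha
  unfold isqrtI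
  rw [← Nat.cast_mul, Int.toNat_natCast, ← pow_two, Nat.sqrt_eq']

-- If n - b*b lies strictly between (a-1)² and a², it is not a perfect square,
-- so B's test fails (used by both the tail lemma and the main simulation).
lemma not_square_between (n b a : Int) (ha : 1 ≤ a)
    (hlo : (a-1) * (a-1) < n - b * b) (hhi : n - b * b < a * a) :
    ¬ (isqrtI (n - b * b) * isqrtI (n - b * b) = n - b * b) := by
  intro h
  set c := isqrtI (n - b * b) with hc
  have hc0 : 0 ≤ c := isqrtI_nonneg _
  have hlt : c * c < a * a := by omega
  have hca : c < a := by nlinarith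
  have : c * c ≤ (a - 1) * (a - 1) := by nlinarith
  omega

-- After A's two pointers have met (b ≤ a while (a-1)² + b² < n), B finds no
-- further pairs: its loop runs to the break and returns pairs unchanged.
lemma tail_lemma (n stop : Int) :
    ∀ (fb : Nat) (b nf : Int) (pairs : List (Int × Int)) (a : Int),
      0 ≤ b → b ≤ a → 1 ≤ a → (a-1) * (a-1) + b * b < n →
      b.toNat + 1 ≤ fb →
      bloop n stop fb b nf pairs = pairs := by
  intro fb
  induction fb with
  | zero => intro b nf pairs a hb hba ha hinv hf; omega
  | succ fb ih =>
    intro b nf pairs a hb hba ha hinv hf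
    show bloop n stop (fb+1) b nf pairs = pairs
    rw [bloop]
    by_cases hstop : nf < stop
    · simp only [if_pos hstop]
      by_cases hbrk : n - b * b ≥ b * b
      · simp only [if_pos hbrk]
      · simp only [if_neg hbrk]
        have hb1 : 1 ≤ b := by nlinarith
        have hhi : n - b * b < a * a := by nlinarith
        have hlo : (a-1) * (a-1) < n - b * b := by omega
        have hns := not_square_between n b a ha hlo hhi
        simp only [if_neg hns]
        exact ih (b-1) nf pairs a (by omega) (by omega) ha (by nlinarith) (by omega)
    · simp only [if_neg hstop]

-- Main simulation: from a state with a ≥ 1, b ≥ 0, asquared = a², bsquared = b²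
-- and the invariant (a-1)² + b² < n, A's loop and B's loop return the same list.
lemma main_lemma (n stop : Int) :
    ∀ (fa fb : Nat) (a b nf : Int) (pairs : List (Int × Int)),
      1 ≤ a → 0 ≤ b → (a-1) * (a-1) + b * b < n →
      (b - a).toNat + 1 ≤ fa → b.toNat + 1 ≤ fb →
      aloop n stop fa a (a * a) b (b * b) nf pairs = bloop n stop fb b nf pairs := by
  intro fa
  induction fa with
  | zero => intro fb a b nf pairs ha hb hinv hfa hfb; omega
  | succ fa ih =>
    intro fb a b nf pairs ha hb hinv hfa hfb
    obtain ⟨fb', rfl⟩ : ∃ fb', fb = fb' + 1 := ⟨fb - 1, by omega⟩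
    show aloop n stop (fa+1) a (a*a) b (b*b) nf pairs = _
    rw [aloop]
    by_cases hcond : a * a < b * b ∧ nf < stop
    · simp only [if_pos hcond]
      obtain ⟨hab2, hstop⟩ := hcond
      have hab : a < b := by nlinarith
      have hb1 : 1 ≤ b := by omega
      rcases lt_trichotomy (a * a + b * b) n with hlt | heq | hgt
      · -- sum < n : A advances a only; B's state unchanged
        have h1 : ¬ (a * a + b * b = n) := by omega
        have h2 : ¬ (a * a + b * b > n) := by omega
        simp only [if_neg h1, if_neg h2]
        have e1 : a * a + (a+1) + (a+1) - 1 = (a+1) * (a+1) := by ring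
        rw [e1]
        exact ih (fb'+1) (a+1) b nf pairs (by omega) hb (by nlinarith) (by omega) hfb
      · -- sum = n : a hit; both append (a², b²)
        simp only [if_pos heq]
        have e1 : a * a + (a+1) + (a+1) - 1 = (a+1) * (a+1) := by ring
        have e2 : b * b - ((b-1) + (b-1) + 1) = (b-1) * (b-1) := by ring
        rw [e1, e2]
        have hA := ih (fb') (a+1) (b-1) (nf+1) (pairs ++ [(a*a, b*b)]) (by omega) (by omega)
          (by nlinarith) (by omega) (by omega)
        rw [hA]
        -- unfold one step of B
        conv_rhs => rw [bloop]
        simp only [if_pos hstop]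
        have hasq : n - b * b = a * a := by omega
        have hnbrk : ¬ (n - b * b ≥ b * b) := by omega
        simp only [if_neg hnbrk]
        rw [hasq, isqrtI_sq a (by omega)]
        simp
      · -- sum > n : A moves b down; B tests b, finds no square, moves b down
        have h1 : ¬ (a * a + b * b = n) := by omega
        simp only [if_neg h1, if_pos hgt]
        have e2 : b * b - ((b-1) + (b-1) + 1) = (b-1) * (b-1) := by ring
        rw [e2]
        have hA := ih fb' a (b-1) nf pairs ha (by omega) (by nlinarith) (by omega) (by omega)
        rw [hA]
        conv_rhs => rw [bloop]
        simp only [if_pos hstop]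
        have hnbrk : ¬ (n - b * b ≥ b * b) := by nlinarith
        simp only [if_neg hnbrk]
        have hns := not_square_between n b a ha (by omega) (by omega)
        simp only [if_neg hns]
    · simp only [if_neg hcond]
      by_cases hstop : nf < stop
      · -- loop ended because a² ≥ b² : pointers met, B finds nothing more
        have hba2 : ¬ (a * a < b * b) := by tauto
        have hba : b ≤ a := by nlinarith
        exact (tail_lemma n stop (fb'+1) b nf pairs a hb hba ha hinv hfb).symm
      · conv_rhs => rw [bloop]
        simp only [if_neg hstop]

-- ===== VERDICT (by name: the statement is the Claim_ definition above) =====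
theorem getsumsquares_spec : Claim_equal_getsumsquares := by
  intro n stopafter _ hpre
  unfold Spec_getsumsquares getsumsquares getsumsquares_alt
  have hn : (1 : Int) ≤ n := hpre
  set b0 := isqrtI (n - 1) with hb0
  have hb0n : 0 ≤ b0 := isqrtI_nonneg _
  have hb0sq : b0 * b0 ≤ n - 1 := isqrtI_sq_le (n-1) (by omega)
  have hb0le : b0 ≤ n - 1 := by nlinarith
  have e1 : (1 : Int) = 1 * 1 := by ring
  simp only []
  rw [e1]
  exact main_lemma n (stopafter.getD n) (n.toNat + 2) (n.toNat + 2) 1 b0 0 [] (by omega)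
    hb0n (by omega) (by omega) (by omega)
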